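-- pv_equiv track=rewrite | github.com/solo21-12/A2SV_Progress | cp/progress/codeforces/1398C Good-Subarrays.py | solve
-- ===== SOURCE A (Python) =====
-- def solve(nums, n):
--     s = 0
--     res = 0
--     prefix = {0: 1}
--     for i, num in enumerate(nums):
--         s += int(num)
--         x = s - i - 1
--         prefix[x] = prefix.get(x, 0) + 1
--
--         res += prefix[x] - 1
--
--     return res
-- ===== SOURCE B (Python) =====
-- def solve(nums, n):
--     # Brute force: count subarrays whose sum equals their length,
--     # i.e. running sum of (element - 1) over [i..j] is zero.
--     res = 0
--     m = len(nums)
--     for i in range(m):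
--         s = 0
--         for j in range(i, m):
--             s += int(nums[j]) - 1
--             if s == 0:
--                 res += 1
--     return res
-- ===== Notes on version B (the rewrite author's own statement) =====
-- stated objective: alternative
-- what changed: Replaces A's single-pass prefix-sum hashmap counting with a direct brute-force double loop over all subarray start/end pairs, testing each running sum against the subarray length.
import Mathlib
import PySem

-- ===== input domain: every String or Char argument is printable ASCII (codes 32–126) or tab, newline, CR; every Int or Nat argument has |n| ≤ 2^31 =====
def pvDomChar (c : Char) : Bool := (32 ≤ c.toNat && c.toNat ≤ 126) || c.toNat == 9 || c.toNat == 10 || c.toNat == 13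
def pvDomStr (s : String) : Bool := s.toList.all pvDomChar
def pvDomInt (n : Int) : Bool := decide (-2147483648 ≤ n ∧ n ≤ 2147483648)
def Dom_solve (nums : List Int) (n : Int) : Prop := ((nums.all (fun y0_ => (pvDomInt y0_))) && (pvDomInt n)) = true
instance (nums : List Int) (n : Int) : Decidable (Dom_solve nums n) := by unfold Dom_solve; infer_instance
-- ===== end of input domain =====

-- B replaces A's one-pass prefix-sum hashmap count with a brute-force double loop
-- over all subarray start/end pairs (alternative decomposition, not faster).

-- ===== PORT A =====
-- state (s, res, prefix); 'prefix[x]' after the assignment is the value 'c' just stored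
def solve (nums : List Int) (n : Int) : Int :=
  ((PySem.List.enumerate nums 0).foldl
    (fun (st : Int × Int × PySem.Dict Int Int) p =>
      let s := st.1 + p.2
      let x := s - p.1 - 1
      let c := st.2.2.getD x 0 + 1
      (s, st.2.1 + (c - 1), st.2.2.insert x c))
    (0, 0, PySem.Dict.empty.insert 0 1)).2.1

-- ===== PORT B =====
-- nums[j] with j drawn from range(i, m) is always in range, so pyGetD is exact here
def solve_alt (nums : List Int) (n : Int) : Int :=
  (PySem.List.pyRange 0 (nums.length : Int) 1).foldl
    (fun res i =>
      ((PySem.List.pyRange i (nums.length : Int) 1).foldl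
        (fun (p : Int × Int) j =>
          (p.1 + PySem.List.pyGetD nums j 0 - 1,
           if p.1 + PySem.List.pyGetD nums j 0 - 1 = 0 then p.2 + 1 else p.2))
        (0, res)).2)
    0

-- ===== PRECONDITION & SPEC =====
def Spec_solve (nums : List Int) (n : Int) (out : Int) : Prop := out = solve_alt nums n
instance (nums : List Int) (n : Int) (out : Int) : Decidable (Spec_solve nums n out) := by unfold Spec_solve; infer_instance

-- ===== CLAIM (what is proved, stated in full; the proofs are below) =====
def Claim_equal_solve : Prop := ∀ (nums : List Int) (n : Int), Dom_solve nums n → Spec_solve nums n (solve nums n)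

-- ===== LEMMAS AND PROOFS =====

-- the running values s - i - 1 of A (equivalently the running sums of (y - 1) of B)
def zseq (a : Int) : List Int → List Int
  | [] => []
  | y :: ys => (a + y - 1) :: zseq (a + y - 1) ys

-- number of ordered pairs of equal values (earlier element paired with each later equal one)
def cep : List Int → Int
  | [] => 0
  | p :: ps => (ps.count p : Int) + cep ps

-- A's accumulation: each new value is paired with the equal ones already seen
def ae : List Int → List Int → Int
  | _, [] => 0
  | seen, x :: l => (seen.count x : Int) + ae (x :: seen) l

lemma zseq_shift (ys : List Int) : ∀ a b : Int, zseq (a + b) ys = (zseq b ys).map (a + ·) := by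
  induction ys with
  | nil => intro a b; simp [zseq]
  | cons y ys ih =>
    intro a b
    simp only [zseq, List.map_cons]
    rw [show a + b + y - 1 = a + (b + y - 1) by ring, ih a (b + y - 1)]

lemma cep_map_add (x : Int) (l : List Int) : cep (l.map (x + ·)) = cep l := by
  induction l with
  | nil => simp [cep]
  | cons p ps ih =>
    simp only [List.map_cons, cep, ih]
    congr 1
    norm_cast
    exact List.count_map_of_injective ps (x + ·) (add_right_injective x) p

lemma count_map_add (x v : Int) (l : List Int) :
    (l.map (x + ·)).count v = l.count (v - x) := by
  have := List.count_map_of_injective l (x + ·) (add_right_injective x) (v - x)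
  simpa using this

lemma sum_ite_eq_count (x : Int) (l : List Int) :
    (l.map (fun q => if q = x then (1:Int) else 0)).sum = (l.count x : Int) := by
  induction l with
  | nil => simp
  | cons p ps ih =>
    simp only [List.map_cons, List.sum_cons, ih, List.count_cons]
    by_cases h : p = x
    · simp [h]; omega
    · simp [h]

lemma ae_eq (l : List Int) : ∀ seen : List Int,
    ae seen l = ((l.map (fun q => (seen.count q : Int))).sum) + cep l := by
  induction l with
  | nil => intro seen; simp [ae, cep]
  | cons x l ih =>
    intro seen
    simp only [ae, cep, ih, List.map_cons, List.sum_cons]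
    have hpt : ∀ q : Int, ((x :: seen).count q : Int) = (seen.count q : Int) + (if q = x then 1 else 0) := by
      intro q
      by_cases h : q = x
      · simp [List.count_cons, h]
      · simp [List.count_cons, h, Ne.symm h]
    have hsum : (l.map (fun q => ((x :: seen).count q : Int))).sum
        = (l.map (fun q => (seen.count q : Int))).sum + (l.count x : Int) := by
      calc (l.map (fun q => ((x :: seen).count q : Int))).sum
          = (l.map (fun q => (seen.count q : Int) + (if q = x then 1 else 0))).sum := by
            congr 1; exact List.map_congr_left (fun q _ => hpt q)
        _ = (l.map (fun q => (seen.count q : Int))).sum + (l.map (fun q => if q = x then (1:Int) else 0)).sum := by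
            rw [← List.sum_map_add]
        _ = (l.map (fun q => (seen.count q : Int))).sum + (l.count x : Int) := by
            rw [sum_ite_eq_count]
    rw [hsum]; ring

lemma loopA (xs : List Int) : ∀ (i0 s0 res0 : Int) (d : PySem.Dict Int Int) (seen : List Int),
    (∀ v : Int, d.getD v 0 = (seen.count v : Int)) →
    (((PySem.List.enumerate xs i0).foldl
      (fun (st : Int × Int × PySem.Dict Int Int) p =>
        let s := st.1 + p.2
        let x := s - p.1 - 1
        let c := st.2.2.getD x 0 + 1
        (s, st.2.1 + (c - 1), st.2.2.insert x c))
      (s0, res0, d)).2.1) = res0 + ae seen (zseq (s0 - i0) xs) := by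
  induction xs with
  | nil => intro i0 s0 res0 d seen hd; simp [PySem.List.enumerate_nil, zseq, ae]
  | cons y ys ih =>
    intro i0 s0 res0 d seen hd
    rw [PySem.List.enumerate_cons, List.foldl_cons]
    simp only
    have hx : s0 + y - i0 - 1 = s0 - i0 + y - 1 := by ring
    have hd' : ∀ v : Int, (d.insert (s0 + y - i0 - 1) (d.getD (s0 + y - i0 - 1) 0 + 1)).getD v 0
        = (((s0 + y - i0 - 1) :: seen).count v : Int) := by
      intro v
      rw [PySem.Dict.getD_insert]
      by_cases h : v = s0 + y - i0 - 1
      · simp [h, List.count_cons, hd]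
      · simp [h, List.count_cons, hd, Ne.symm h]
    have := ih (i0 + 1) (s0 + y) (res0 + (d.getD (s0 + y - i0 - 1) 0 + 1 - 1))
      (d.insert (s0 + y - i0 - 1) (d.getD (s0 + y - i0 - 1) 0 + 1))
      ((s0 + y - i0 - 1) :: seen) hd'
    rw [this]
    have hs : s0 + y - (i0 + 1) = s0 - i0 + y - 1 := by ring
    rw [hs]
    simp only [zseq, ae, hd, ← hx]
    ring

lemma solve_eq_cep (nums : List Int) (n : Int) :
    solve nums n = cep (0 :: zseq 0 nums) := by
  unfold solve
  have hd : ∀ v : Int, (PySem.Dict.empty.insert (0:Int) (1:Int)).getD v 0 = (([0] : List Int).count v : Int) := by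
    intro v
    rw [PySem.Dict.getD_insert]
    by_cases h : v = 0
    · simp [h]
    · simp [List.count_cons, h, Ne.symm h]
  rw [loopA nums 0 0 0 _ [0] hd]
  rw [ae_eq]
  simp only [cep, zero_add, show (0:Int) - 0 = 0 from rfl]
  congr 1
  calc ((zseq 0 nums).map (fun q => ((([0] : List Int).count q : Nat) : Int))).sum
      = ((zseq 0 nums).map (fun q => if q = 0 then (1:Int) else 0)).sum := by
        refine congrArg List.sum (List.map_congr_left (fun q _ => ?_))
        by_cases h : q = 0
        · simp [h]
        · simp [List.count_cons, h, Ne.symm h]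
    _ = ((zseq 0 nums).count 0 : Int) := sum_ite_eq_count 0 (zseq 0 nums)

lemma innerB (ys : List Int) : ∀ (s0 r0 : Int),
    ((ys.foldl (fun (p : Int × Int) v =>
        (p.1 + v - 1, if p.1 + v - 1 = 0 then p.2 + 1 else p.2)) (s0, r0)).2)
      = r0 + ((zseq s0 ys).count 0 : Int) := by
  induction ys with
  | nil => intro s0 r0; simp [zseq]
  | cons y ys ih =>
    intro s0 r0
    rw [List.foldl_cons]
    simp only [zseq]
    rw [ih]
    by_cases h : s0 + y - 1 = 0 <;> simp [h, List.count_cons] <;> ring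

lemma sum_drops (ys : List Int) :
    (((List.range ys.length).map (fun k => ((zseq 0 (ys.drop k)).count 0 : Int))).sum)
      = cep (0 :: zseq 0 ys) := by
  induction ys with
  | nil => simp [zseq, cep]
  | cons y ys ih =>
    rw [List.length_cons, List.range_succ_eq_map, List.map_cons, List.sum_cons,
        List.map_map]
    have htail : ((List.range ys.length).map ((fun k => ((zseq 0 ((y :: ys).drop k)).count 0 : Int)) ∘ (· + 1))).sum
        = cep (0 :: zseq 0 ys) := by
      rw [← ih]; congr 1
    rw [htail]
    have hz : zseq 0 (y :: ys) = (y - 1) :: (zseq 0 ys).map ((y - 1) + ·) := by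
      have h := zseq_shift ys (y - 1) 0
      rw [add_zero] at h
      simp only [zseq, show (0:Int) + y - 1 = y - 1 from by ring, h]
    rw [List.drop_zero, hz]
    simp only [cep, cep_map_add, count_map_add, sub_self]

lemma solve_alt_eq_cep (nums : List Int) (n : Int) :
    solve_alt nums n = cep (0 :: zseq 0 nums) := by
  unfold solve_alt
  have hbody : ∀ (res i : Int), i ∈ PySem.List.pyRange 0 (nums.length : Int) 1 →
      ((PySem.List.pyRange i (nums.length : Int) 1).foldl
        (fun (p : Int × Int) j =>
          (p.1 + PySem.List.pyGetD nums j 0 - 1,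
           if p.1 + PySem.List.pyGetD nums j 0 - 1 = 0 then p.2 + 1 else p.2))
        (0, res)).2
      = res + ((zseq 0 (nums.drop i.toNat)).count 0 : Int) := by
    intro res i hi
    have hi0 : 0 ≤ i := ((PySem.List.mem_pyRange_one).1 hi).1
    rw [PySem.List.foldl_pyRange_pyGetD' nums 0
      (fun (p : Int × Int) v => (p.1 + v - 1, if p.1 + v - 1 = 0 then p.2 + 1 else p.2))
      (0, res) hi0]
    exact innerB (nums.drop i.toNat) 0 res
  rw [PySem.List.foldl_congr_mem _ _
    (fun res i => res + ((zseq 0 (nums.drop i.toNat)).count 0 : Int)) 0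
    (fun res i hi => hbody res i hi)]
  rw [PySem.List.foldl_add]
  rw [PySem.List.pyRange_zero_natCast]
  rw [List.map_map]
  simp only [Function.comp_def, Int.toNat_natCast]
  rw [sum_drops]
  ring

-- ===== VERDICT (by name: the statement is the Claim_ definition above) =====
theorem solve_spec : Claim_equal_solve := by
  intro nums n _
  unfold Spec_solve
  rw [solve_eq_cep, solve_alt_eq_cep]
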